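-- pv_equiv track=rewrite | github.com/eitanspi/polar-codes-mac | polar/decoder.py | _detect_path_i
-- ===== SOURCE A (Python) =====
-- def _detect_path_i(N, b):
--     """
--     Detect path_i from path vector b of length 2N.
--
--     Returns path_i in [0, N] if b = 0^{path_i} 1^N 0^{N-path_i},
--     or -1 for unrecognised structure.
--     """
--     if len(b) != 2 * N:
--         return -1
--     pi = 0
--     while pi < len(b) and b[pi] == 0:
--         pi += 1
--     if pi > N:
--         return -1
--     end_ones = pi + N
--     if end_ones > 2 * N:
--         return -1
--     if (all(b[k] == 1 for k in range(pi, end_ones)) and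
--             all(b[k] == 0 for k in range(end_ones, 2 * N))):
--         return pi
--     return -1
-- ===== SOURCE B (Python) =====
-- def _detect_path_i(N, b):
--     """Detect path_i by direct comparison with the canonical vector 0^pi 1^N 0^(N-pi)."""
--     if len(b) != 2 * N:
--         return -1
--     b = list(b)
--     try:
--         pi = b.index(1)
--     except ValueError:
--         pi = 0
--     expected = [0] * pi + [1] * N + [0] * (N - pi)
--     return pi if b == expected else -1
-- ===== Notes on version B (the rewrite author's own statement) =====
-- stated objective: simpler
-- what changed: Replaces the leading-zero scan, oversize-pi guard and two index-range all() checks by locating the first 1 with list.index and comparing b once against the canonical vector [0]*pi + [1]*N + [0]*(N-pi).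
import Mathlib
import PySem

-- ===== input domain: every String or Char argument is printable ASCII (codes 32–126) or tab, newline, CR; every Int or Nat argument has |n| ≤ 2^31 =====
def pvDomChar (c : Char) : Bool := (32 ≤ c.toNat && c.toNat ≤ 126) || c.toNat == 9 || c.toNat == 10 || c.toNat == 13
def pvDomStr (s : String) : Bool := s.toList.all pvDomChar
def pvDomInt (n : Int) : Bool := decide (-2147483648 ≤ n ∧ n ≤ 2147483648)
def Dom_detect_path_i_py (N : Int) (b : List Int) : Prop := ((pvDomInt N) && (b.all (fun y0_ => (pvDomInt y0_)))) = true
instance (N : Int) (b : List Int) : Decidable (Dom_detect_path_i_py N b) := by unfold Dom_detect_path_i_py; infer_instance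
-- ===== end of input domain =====

-- B finds the first 1 with list.index and compares b once against the canonical vector
-- [0]*pi + [1]*N + [0]*(N-pi), replacing A's scan, guards and per-index checks (simpler).


-- ===== PORT A =====
-- the 'while pi < len(b) and b[pi] == 0: pi += 1' loop, scanning b from the front
def pvLeadZeros : List Int → Nat
  | [] => 0
  | x :: xs => if x = 0 then pvLeadZeros xs + 1 else 0

def detect_path_i_py (N : Int) (b : List Int) : Int :=
  if (b.length : Int) ≠ 2 * N then -1
  else
    let pi : Int := (pvLeadZeros b : Int)
    if pi > N then -1
    else
      let end_ones := pi + N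
      if end_ones > 2 * N then -1
      else if ((PySem.List.pyRange pi end_ones 1).all (fun k => PySem.List.pyGet? b k == some 1)
            && (PySem.List.pyRange end_ones (2 * N) 1).all (fun k => PySem.List.pyGet? b k == some 0))
      then pi else -1

-- ===== PORT B =====
def detect_path_i_py_alt (N : Int) (b : List Int) : Int :=
  if (b.length : Int) ≠ 2 * N then -1
  else
    let pi : Int := match PySem.List.index? b 1 with
      | some i => (i : Int)
      | none => 0
    let expected : List Int :=
      PySem.List.pyRepeat [0] pi ++ PySem.List.pyRepeat [1] N ++ PySem.List.pyRepeat [0] (N - pi)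
    if b = expected then pi else -1

-- ===== PRECONDITION & SPEC =====
def Spec_detect_path_i_py (N : Int) (b : List Int) (out : Int) : Prop := out = detect_path_i_py_alt N b
instance (N : Int) (b : List Int) (out : Int) : Decidable (Spec_detect_path_i_py N b out) := by unfold Spec_detect_path_i_py; infer_instance

-- ===== CLAIM (what is proved, stated in full; the proofs are below) =====
def Claim_equal_detect_path_i_py : Prop := ∀ (N : Int) (b : List Int), Dom_detect_path_i_py N b → Spec_detect_path_i_py N b (detect_path_i_py N b)

-- ===== LEMMAS AND PROOFS =====

-- the canonical vector 0^p 1^n 0^(n-p)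
def pvCanon (n p : Nat) : List Int :=
  List.replicate p 0 ++ List.replicate n 1 ++ List.replicate (n - p) 0

theorem pv_lz_prefix (b : List Int) (k : Nat) (h : k < pvLeadZeros b) : b[k]? = some 0 := by
  induction b generalizing k with
  | nil => simp [pvLeadZeros] at h
  | cons x xs ih =>
    by_cases hx : x = 0
    · cases k with
      | zero => simp [hx]
      | succ k =>
        simp only [pvLeadZeros, if_pos hx] at h
        simpa using ih k (by omega)
    · simp [pvLeadZeros, hx] at h

theorem pv_lz_rep (p : Nat) (l : List Int) : pvLeadZeros (List.replicate p 0 ++ 1 :: l) = p := by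
  induction p with
  | zero => simp [pvLeadZeros]
  | succ p ih => simp [List.replicate_succ, pvLeadZeros, ih]

theorem pv_canon_length (n p : Nat) (hp : p ≤ n) : (pvCanon n p).length = 2*n := by
  simp [pvCanon]; omega

theorem pv_canon_getElem? (n p i : Nat) (_hp : p ≤ n) (hi : i < 2*n) :
    (pvCanon n p)[i]? = some (if i < p then 0 else if i < p + n then 1 else 0) := by
  unfold pvCanon
  simp only [List.getElem?_append, List.getElem?_replicate, List.length_replicate]
  split_ifs <;> simp_all <;> omega

theorem pv_index?_canon (n p : Nat) (hn : 0 < n) : PySem.List.index? (pvCanon n p) 1 = some p := by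
  rw [PySem.List.index?_eq_some_iff]
  refine ⟨List.replicate p 0, List.replicate (n-1) 1 ++ List.replicate (n - p) 0, ?_, by simp, by simp⟩
  unfold pvCanon
  cases n with
  | zero => omega
  | succ m => simp [List.replicate_succ]

theorem pv_recon (N : Int) (b : List Int) (n : Nat) (hN : N = (n:Int)) (hlen : b.length = 2*n)
    (hpA : pvLeadZeros b ≤ n)
    (h1 : ∀ k : Int, (pvLeadZeros b : Int) ≤ k → k < (pvLeadZeros b : Int) + N → PySem.List.pyGet? b k = some 1)
    (h0 : ∀ k : Int, (pvLeadZeros b : Int) + N ≤ k → k < 2*N → PySem.List.pyGet? b k = some 0) :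
    b = pvCanon n (pvLeadZeros b) := by
  apply List.ext_getElem?
  intro i
  by_cases hi : i < 2*n
  · rw [pv_canon_getElem? n _ i hpA hi]
    split_ifs with c1 c2
    · exact pv_lz_prefix b i c1
    · have h := h1 (i:Int) (by exact_mod_cast Nat.le_of_not_lt c1)
        (by rw [hN]; omega)
      rwa [PySem.List.pyGet?_natCast] at h
    · have h := h0 (i:Int) (by rw [hN]; omega) (by rw [hN]; omega)
      rwa [PySem.List.pyGet?_natCast] at h
  · rw [List.getElem?_eq_none (by omega),
        List.getElem?_eq_none (by rw [pv_canon_length n _ hpA]; omega)]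

-- B returns p on the canonical vector
theorem pv_B_canon (N : Int) (n p : Nat) (hN : N = (n:Int)) (hp : p ≤ n) :
    detect_path_i_py_alt N (pvCanon n p) = p := by
  subst hN
  unfold detect_path_i_py_alt
  rw [if_neg (by rw [pv_canon_length n p hp]; push_cast; ring_nf; omega)]
  rcases Nat.eq_zero_or_pos n with hn | hn
  · subst hn
    have hp0 : p = 0 := by omega
    subst hp0
    simp [pvCanon, PySem.List.index?, PySem.List.pyRepeat]
  · rw [pv_index?_canon n p hn]
    simp only [PySem.List.pyRepeat_singleton]
    have ht : ((n:Int) - (p:Int)).toNat = n - p := by omega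
    rw [if_pos (by simp [pvCanon, ht])]

theorem pv_A_canon (N : Int) (n p : Nat) (hN : N = (n:Int)) (hp : p ≤ n) :
    detect_path_i_py N (pvCanon n p) = p := by
  subst hN
  unfold detect_path_i_py
  rw [if_neg (by rw [pv_canon_length n p hp]; push_cast; omega)]
  rcases Nat.eq_zero_or_pos n with hn | hn
  · subst hn
    have hp0 : p = 0 := by omega
    subst hp0
    simp [pvCanon, pvLeadZeros, PySem.List.pyRange]
  · have hlz : pvLeadZeros (pvCanon n p) = p := by
      unfold pvCanon
      obtain ⟨m, rfl⟩ : ∃ m, n = m+1 := ⟨n-1, by omega⟩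
      simpa [List.replicate_succ] using pv_lz_rep p (List.replicate m 1 ++ List.replicate (m+1-p) 0)
    rw [hlz]
    rw [if_neg (by omega)]
    rw [if_neg (by omega)]
    rw [if_pos ?_]
    · rw [Bool.and_eq_true]
      constructor
      · rw [List.all_eq_true]
        intro k hk
        rw [PySem.List.mem_pyRange_one] at hk
        obtain ⟨hk1, hk2⟩ := hk
        have hk0 : 0 ≤ k := le_trans (by positivity) hk1
        rw [PySem.List.pyGet?_of_nonneg _ hk0,
            pv_canon_getElem? n p k.toNat hp (by omega)]
        have c1 : ¬ (k.toNat < p) := by omega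
        have c2 : k.toNat < p + n := by omega
        simp [c1, c2]
      · rw [List.all_eq_true]
        intro k hk
        rw [PySem.List.mem_pyRange_one] at hk
        obtain ⟨hk1, hk2⟩ := hk
        have hk0 : 0 ≤ k := le_trans (by positivity) hk1
        rw [PySem.List.pyGet?_of_nonneg _ hk0,
            pv_canon_getElem? n p k.toNat hp (by omega)]
        have c1 : ¬ (k.toNat < p) := by omega
        have c2 : ¬ (k.toNat < p + n) := by omega
        simp [c1, c2]

theorem pv_B_neg (N : Int) (b : List Int) (n : Nat) (hN : N = (n:Int)) (hlen : b.length = 2*n)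
    (hc : ¬ ∃ p, p ≤ n ∧ b = pvCanon n p) :
    detect_path_i_py_alt N b = -1 := by
  subst hN
  unfold detect_path_i_py_alt
  rw [if_neg (by rw [hlen]; omega)]
  rw [if_neg ?_]
  intro hexp
  apply hc
  set pi : Int := (match PySem.List.index? b 1 with | some i => (i:Int) | none => 0) with hpi
  have hpi0 : 0 ≤ pi := by
    rw [hpi]; cases PySem.List.index? b 1 <;> simp
  rw [PySem.List.pyRepeat_singleton, PySem.List.pyRepeat_singleton,
      PySem.List.pyRepeat_singleton] at hexp
  have hl := congrArg List.length hexp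
  simp only [List.length_append, List.length_replicate, Int.toNat_natCast, hlen] at hl
  have hple : pi.toNat ≤ n := by omega
  have ht : ((n:Int) - pi).toNat = n - pi.toNat := by omega
  refine ⟨pi.toNat, hple, ?_⟩
  rw [hexp]
  simp [pvCanon, ht, Int.toNat_natCast]

theorem pv_A_neg (N : Int) (b : List Int) (n : Nat) (hN : N = (n:Int)) (hlen : b.length = 2*n)
    (hc : ¬ ∃ p, p ≤ n ∧ b = pvCanon n p) :
    detect_path_i_py N b = -1 := by
  unfold detect_path_i_py
  rw [if_neg (by rw [hlen, hN]; omega)]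
  by_cases hg1 : (pvLeadZeros b : Int) > N
  · rw [if_pos hg1]
  · rw [if_neg hg1]
    by_cases hg2 : (pvLeadZeros b : Int) + N > 2*N
    · rw [if_pos hg2]
    · rw [if_neg hg2]
      rw [if_neg ?_]
      intro hall
      rw [Bool.and_eq_true, List.all_eq_true, List.all_eq_true] at hall
      apply hc
      have hple : pvLeadZeros b ≤ n := by
        subst hN; omega
      refine ⟨pvLeadZeros b, hple, pv_recon N b n hN hlen hple ?_ ?_⟩
      · intro k hk1 hk2
        have := hall.1 k (PySem.List.mem_pyRange_one.mpr ⟨hk1, hk2⟩)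
        simpa using this
      · intro k hk1 hk2
        have := hall.2 k (PySem.List.mem_pyRange_one.mpr ⟨hk1, hk2⟩)
        simpa using this

theorem pv_main (N : Int) (b : List Int) : detect_path_i_py N b = detect_path_i_py_alt N b := by
  by_cases hb : (b.length : Int) = 2 * N
  · obtain ⟨n, hN⟩ : ∃ n : Nat, N = (n:Int) := ⟨N.toNat, by omega⟩
    have hlen : b.length = 2*n := by subst hN; omega
    by_cases hc : ∃ p, p ≤ n ∧ b = pvCanon n p
    · obtain ⟨p, hp, rfl⟩ := hc
      rw [pv_A_canon N n p hN hp, pv_B_canon N n p hN hp]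
    · rw [pv_A_neg N b n hN hlen hc, pv_B_neg N b n hN hlen hc]
  · unfold detect_path_i_py detect_path_i_py_alt
    rw [if_pos hb, if_pos hb]

-- ===== VERDICT (by name: the statement is the Claim_ definition above) =====
theorem detect_path_i_py_spec : Claim_equal_detect_path_i_py := by
  intro N b _
  unfold Spec_detect_path_i_py
  exact pv_main N b
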